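-- pv_equiv track=rewrite | github.com/sonneveld/advent-of-code | advent19/22/solution.py | unshuffle_deck
-- ===== SOURCE A (Python) =====
-- import collections
--
-- def unshuffle_deck(data, deck):
--
--     def reverse_deck(old_stack):
--         old_stack.reverse()
--         return old_stack
--
--     def rotate_deck(stack, n):
--         d = collections.deque(stack)
--         d.rotate(n)
--         return list(d)
--
--     def mul_mod_deck(stack, n):
--         new_stack = [None] * len(stack)
--         for i in range(len(stack)):
--             other_i = (i*n)%len(stack)
--             new_stack[i] = stack[other_i]
--         return new_stack
--
--     for cmd, n in reversed(data):
--         if cmd == 'cut':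
--             deck = rotate_deck(deck, n)
--         elif cmd == "deal-increment":
--             deck = mul_mod_deck(deck, n)
--         elif cmd == "deal-new":
--             deck = reverse_deck(deck)
--
--     return deck
-- ===== SOURCE B (Python) =====
-- def unshuffle_deck(data, deck):
--     L = len(deck)
--     if L == 0:
--         return []
--     # Compose all reversed ops into one affine index map: result[i] = deck[(a*i + b) % L]
--     a, b = 1, 0
--     for cmd, n in reversed(data):
--         if cmd == 'cut':
--             b = (b - a * n) % L
--         elif cmd == 'deal-increment':
--             a = (a * n) % L
--         elif cmd == 'deal-new':
--             a, b = (-a) % L, (b - a) % L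
--     return [deck[(a * i + b) % L] for i in range(L)]
-- ===== Notes on version B (the rewrite author's own statement) =====
-- stated objective: alternative
-- what changed: Instead of materialising a new full deck for every reversed command, B composes all commands into a single affine index map i -> (a*i+b) mod L and applies it to the deck once.
import Mathlib
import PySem

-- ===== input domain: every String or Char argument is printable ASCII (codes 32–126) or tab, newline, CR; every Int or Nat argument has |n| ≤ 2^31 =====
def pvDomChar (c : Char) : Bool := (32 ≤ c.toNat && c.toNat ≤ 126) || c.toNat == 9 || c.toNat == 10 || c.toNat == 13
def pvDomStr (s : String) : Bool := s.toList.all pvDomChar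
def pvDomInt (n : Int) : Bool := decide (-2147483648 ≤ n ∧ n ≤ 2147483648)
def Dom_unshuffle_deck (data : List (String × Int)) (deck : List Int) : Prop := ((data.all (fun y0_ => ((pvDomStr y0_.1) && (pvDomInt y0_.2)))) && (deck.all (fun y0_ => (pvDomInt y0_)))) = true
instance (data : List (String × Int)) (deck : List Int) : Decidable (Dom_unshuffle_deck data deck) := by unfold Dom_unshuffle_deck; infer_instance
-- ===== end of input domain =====

-- B composes all reversed shuffle commands into one affine index map (a*i+b) mod L applied once,
-- instead of rebuilding the whole deck per command. (A's reverse_deck mutates the caller's list in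
-- place on the first 'deal-new'; the equivalence proved here is about the return value only.)


-- ===== PORT A =====
-- collections.deque(stack).rotate(n) then list(): element i of the result is stack[(i-n) % len(stack)]
-- (exact for every n, including negative and |n| ≥ len; vacuous on the empty list, where rotate is a no-op).
def pvRotateDeck (stack : List Int) (n : Int) : List Int :=
  (PySem.List.pyRange 0 (stack.length : Int) 1).map
    (fun i => PySem.List.pyGetD stack (PySem.Int.mod (i - n) (stack.length : Int)) 0)

-- new_stack[i] = stack[(i*n) % len(stack)] for i in range(len(stack))
def pvMulModDeck (stack : List Int) (n : Int) : List Int :=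
  (PySem.List.pyRange 0 (stack.length : Int) 1).map
    (fun i => PySem.List.pyGetD stack (PySem.Int.mod (i * n) (stack.length : Int)) 0)

def pvStepA (d : List Int) (p : String × Int) : List Int :=
  if p.1 == "cut" then pvRotateDeck d p.2
  else if p.1 == "deal-increment" then pvMulModDeck d p.2
  else if p.1 == "deal-new" then d.reverse
  else d

def unshuffle_deck (data : List (String × Int)) (deck : List Int) : List Int :=
  data.reverse.foldl pvStepA deck

-- ===== PORT B =====
def pvStepB (L : Int) (ab : Int × Int) (p : String × Int) : Int × Int :=
  if p.1 == "cut" then (ab.1, PySem.Int.mod (ab.2 - ab.1 * p.2) L)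
  else if p.1 == "deal-increment" then (PySem.Int.mod (ab.1 * p.2) L, ab.2)
  else if p.1 == "deal-new" then (PySem.Int.mod (-ab.1) L, PySem.Int.mod (ab.2 - ab.1) L)
  else ab

def unshuffle_deck_alt (data : List (String × Int)) (deck : List Int) : List Int :=
  if deck.length == 0 then []
  else
    let L : Int := (deck.length : Int)
    let ab := data.reverse.foldl (pvStepB L) (1, 0)
    (PySem.List.pyRange 0 L 1).map
      (fun i => PySem.List.pyGetD deck (PySem.Int.mod (ab.1 * i + ab.2) L) 0)

-- ===== PRECONDITION & SPEC =====
def Spec_unshuffle_deck (data : List (String × Int)) (deck : List Int) (out : List Int) : Prop := out = unshuffle_deck_alt data deck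
instance (data : List (String × Int)) (deck : List Int) (out : List Int) : Decidable (Spec_unshuffle_deck data deck out) := by unfold Spec_unshuffle_deck; infer_instance

-- ===== CLAIM (what is proved, stated in full; the proofs are below) =====
def Claim_equal_unshuffle_deck : Prop := ∀ (data : List (String × Int)) (deck : List Int), Dom_unshuffle_deck data deck → Spec_unshuffle_deck data deck (unshuffle_deck data deck)

-- ===== LEMMAS AND PROOFS =====

-- the deck obtained by reading position (a*i+b) mod L of d
def pvAff (a b : Int) (d : List Int) : List Int :=
  (PySem.List.pyRange 0 (d.length : Int) 1).map
    (fun i => PySem.List.pyGetD d (PySem.Int.mod (a * i + b) (d.length : Int)) 0)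

lemma pvAff_length (a b : Int) (d : List Int) : (pvAff a b d).length = d.length := by
  simp [pvAff, PySem.List.length_pyRange_one]

lemma pvMod_congr {L x y : Int} (hL : 0 < L) (h : x ≡ y [ZMOD L]) :
    PySem.Int.mod x L = PySem.Int.mod y L := by
  rw [PySem.Int.mod_eq_emod_of_pos hL, PySem.Int.mod_eq_emod_of_pos hL]
  exact h

lemma pvMod_self_modeq {L x : Int} (hL : 0 < L) : PySem.Int.mod x L ≡ x [ZMOD L] := by
  rw [PySem.Int.mod_eq_emod_of_pos hL]
  exact Int.emod_emod_of_dvd x dvd_rfl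

lemma pvAff_getElem (a b : Int) (d : List Int) (k : Nat) (hk : k < (pvAff a b d).length) :
    (pvAff a b d)[k] = PySem.List.pyGetD d (PySem.Int.mod (a * k + b) (d.length : Int)) 0 := by
  simp only [pvAff, List.getElem_map, PySem.List.getElem_pyRange_one, zero_add]

lemma pvAff_pyGetD (a b : Int) (d : List Int) (j : Int) (h0 : 0 ≤ j) (h1 : j < (d.length : Int)) :
    PySem.List.pyGetD (pvAff a b d) j 0
      = PySem.List.pyGetD d (PySem.Int.mod (a * j + b) (d.length : Int)) 0 := by
  unfold pvAff
  rw [PySem.List.pyGetD_map_pyRange_of_nonneg _ _ _ _ h0 h1]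

lemma stepA_pvAff (d : List Int) (hd : d ≠ []) (a b : Int) (p : String × Int) :
    pvStepA (pvAff a b d) p
      = pvAff (pvStepB (d.length : Int) (a, b) p).1 (pvStepB (d.length : Int) (a, b) p).2 d := by
  have hL : 0 < (d.length : Int) := by
    have : d.length ≠ 0 := fun h => hd (List.eq_nil_of_length_eq_zero h)
    omega
  unfold pvStepA pvStepB
  split
  · -- cut
    apply List.ext_getElem
    · simp [pvRotateDeck, pvAff_length, PySem.List.length_pyRange_one]
    intro k h1 h2
    have hk : k < d.length := by
      simpa [pvRotateDeck, PySem.List.length_pyRange_one, pvAff_length] using h1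
    simp only [pvRotateDeck, List.getElem_map, PySem.List.getElem_pyRange_one, zero_add,
      pvAff_length]
    rw [pvAff_pyGetD _ _ _ _ (PySem.Int.mod_nonneg _ hL) (PySem.Int.mod_lt _ hL)]
    rw [pvAff_getElem _ _ _ _ (by rw [pvAff_length]; exact hk)]
    congr 1
    apply pvMod_congr hL
    calc a * PySem.Int.mod ((k : Int) - p.2) (d.length : Int) + b
        ≡ a * ((k : Int) - p.2) + b [ZMOD (d.length : Int)] :=
          ((pvMod_self_modeq hL).mul_left a).add_right b
      _ = a * (k : Int) + (b - a * p.2) := by ring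
      _ ≡ a * (k : Int) + PySem.Int.mod (b - a * p.2) (d.length : Int) [ZMOD (d.length : Int)] :=
          ((pvMod_self_modeq hL).symm).add_left _
  · split
    · -- deal-increment
      apply List.ext_getElem
      · simp [pvMulModDeck, pvAff_length, PySem.List.length_pyRange_one]
      intro k h1 h2
      have hk : k < d.length := by
        simpa [pvMulModDeck, PySem.List.length_pyRange_one, pvAff_length] using h1
      simp only [pvMulModDeck, List.getElem_map, PySem.List.getElem_pyRange_one, zero_add,
        pvAff_length]
      rw [pvAff_pyGetD _ _ _ _ (PySem.Int.mod_nonneg _ hL) (PySem.Int.mod_lt _ hL)]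
      rw [pvAff_getElem _ _ _ _ (by rw [pvAff_length]; exact hk)]
      congr 1
      apply pvMod_congr hL
      calc a * PySem.Int.mod ((k : Int) * p.2) (d.length : Int) + b
          ≡ a * ((k : Int) * p.2) + b [ZMOD (d.length : Int)] :=
            ((pvMod_self_modeq hL).mul_left a).add_right b
        _ = (a * p.2) * (k : Int) + b := by ring
        _ ≡ PySem.Int.mod (a * p.2) (d.length : Int) * (k : Int) + b [ZMOD (d.length : Int)] :=
            (((pvMod_self_modeq hL).symm).mul_right _).add_right b
    · split
      · -- deal-new
        apply List.ext_getElem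
        · simp [pvAff_length]
        intro k h1 h2
        have hk : k < d.length := by simpa [pvAff_length] using h1
        rw [List.getElem_reverse]
        rw [pvAff_getElem _ _ _ _ (by rw [pvAff_length]; omega)]
        rw [pvAff_getElem _ _ _ _ (by rw [pvAff_length]; exact hk)]
        congr 1
        apply pvMod_congr hL
        have hcast : (((pvAff a b d).length - 1 - k : Nat) : Int) = (d.length : Int) - 1 - k := by
          rw [pvAff_length]; omega
        rw [hcast]
        calc a * ((d.length : Int) - 1 - (k : Int)) + b
            ≡ (-a) * (k : Int) + (b - a) [ZMOD (d.length : Int)] := by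
              rw [Int.ModEq]
              have he : a * ((d.length : Int) - 1 - (k : Int)) + b
                  = ((-a) * (k : Int) + (b - a)) + a * (d.length : Int) := by ring
              rw [he]
              exact Int.add_mul_emod_self_right _ _ _
          _ ≡ PySem.Int.mod (-a) (d.length : Int) * (k : Int)
                + PySem.Int.mod (b - a) (d.length : Int) [ZMOD (d.length : Int)] :=
              (((pvMod_self_modeq hL).symm).mul_right _).add ((pvMod_self_modeq hL).symm)
      · rfl

lemma foldA_pvAff (ops : List (String × Int)) (d : List Int) (hd : d ≠ []) (a b : Int) :
    ops.foldl pvStepA (pvAff a b d)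
      = pvAff (ops.foldl (pvStepB (d.length : Int)) (a, b)).1
              (ops.foldl (pvStepB (d.length : Int)) (a, b)).2 d := by
  induction ops generalizing a b with
  | nil => rfl
  | cons p ops ih =>
    rw [List.foldl_cons, List.foldl_cons, stepA_pvAff d hd a b p]
    rw [show pvStepB (d.length : Int) (a, b) p
        = ((pvStepB (d.length : Int) (a, b) p).1, (pvStepB (d.length : Int) (a, b) p).2) from rfl]
    exact ih _ _

lemma pvAff_one_zero (d : List Int) : pvAff 1 0 d = d := by
  unfold pvAff
  have h : ∀ i ∈ PySem.List.pyRange 0 (d.length : Int) 1,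
      PySem.List.pyGetD d (PySem.Int.mod (1 * i + 0) (d.length : Int)) 0
        = PySem.List.pyGetD d i 0 := by
    intro i hi
    rw [PySem.List.mem_pyRange_one] at hi
    congr 1
    have hL : 0 < (d.length : Int) := by omega
    rw [PySem.Int.mod_eq_emod_of_pos hL, one_mul, add_zero]
    exact Int.emod_eq_of_lt hi.1 hi.2
  rw [List.map_congr_left h]
  exact PySem.List.map_pyGetD_pyRange_zero' d 0

lemma foldA_nil_deck (ops : List (String × Int)) : ops.foldl pvStepA [] = [] := by
  induction ops with
  | nil => rfl
  | cons p ops ih =>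
    rw [List.foldl_cons]
    have h : pvStepA [] p = [] := by
      unfold pvStepA pvRotateDeck pvMulModDeck
      split <;> simp
    rw [h, ih]

-- ===== VERDICT (by name: the statement is the Claim_ definition above) =====
theorem unshuffle_deck_spec : Claim_equal_unshuffle_deck := by
  intro data deck _
  unfold Spec_unshuffle_deck unshuffle_deck unshuffle_deck_alt
  by_cases hd : deck = []
  · subst hd
    rw [foldA_nil_deck]
    rfl
  · have hne : (deck.length == 0) = false := by
      simp [List.length_eq_zero_iff, hd]
    rw [hne]
    simp only [Bool.false_eq_true, if_false]
    conv_lhs => rw [← pvAff_one_zero deck]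
    exact foldA_pvAff data.reverse deck hd 1 0
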